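-- pv_equiv track=rewrite | github.com/DominikKor/bwinf41 | Abgabe/Junioraufgabe1/junior1.py | get_rhyme_part
-- ===== SOURCE A (Python) =====
-- from typing import List, Tuple, Optional
--
-- VOWELS = "aeiouäöü"
--
-- def get_rhyme_part(word: str) -> Optional[str]:
--     """
--     This function iterates over the word backwards.
--     It searches for the first vowel group,
--     then for the second vowel group (there must at least one consonant between vowel groups)
--     and returns the part of the word that is from the second vowel group to the end of the word.
--     If there is only one vowel group in the whole word, it returns after finding the first vowel group.
--
--
--     The function return None if any of the following is true:
--     - the word is empty
--     - the word has no vowel groups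
--     - the resulting part of the word is less than half the whole word (violates second rule of task)
--
--     :param word: The word to get the rhyme part from
--     :return: The rhyme part of the word as string or None if [check list above]
--     """
--     at_last_vowel_group = False
--     between_vowel_groups = False
--     at_penultimate_vowel_group = False
--     result = None
--     for idx, i in enumerate(reversed(word)):
--         if is_vowel(i, word):
--             if not any([is_vowel(j, word) for j in word[:-(idx + 1)]]):
--                 result = word[-(idx + 1):]
--                 break
--             if at_last_vowel_group and between_vowel_groups:
--                 at_penultimate_vowel_group = True
--             at_last_vowel_group = True
--         elif at_penultimate_vowel_group:
--             result = word[-idx:]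
--             break
--         elif at_last_vowel_group and not between_vowel_groups:
--             between_vowel_groups = True
--
--     if not result or (len(word) / 2) > len(result):
--         return None
--     return result
--
-- def is_vowel(char: str, word: str) -> bool:
--     # If the char is "y" and no other vowel is in the word, "y" is considered a vowel
--     if char == "y" and not any(v in word for v in VOWELS):
--         return True
--     return char in VOWELS
-- ===== SOURCE B (Python) =====
-- from typing import Optional
--
-- VOWELS = "aeiouäöü"
--
-- def get_rhyme_part(word: str) -> Optional[str]:
--     # O(n): compute vowel flags once (y counts only if the word has no ordinary
--     # vowel), then locate the start of the second-last vowel group by index scans.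
--     y_is_vowel = not any(v in word for v in VOWELS)
--     flags = [c in VOWELS or (c == "y" and y_is_vowel) for c in word]
--     n = len(word)
--     # rightmost vowel
--     i = n - 1
--     while i >= 0 and not flags[i]:
--         i -= 1
--     if i < 0:
--         return None
--     # start of the last vowel group
--     while i > 0 and flags[i - 1]:
--         i -= 1
--     s = i
--     # rightmost vowel left of the last group (if any), then its group start
--     j = s - 1
--     while j >= 0 and not flags[j]:
--         j -= 1
--     if j >= 0:
--         while j > 0 and flags[j - 1]:
--             j -= 1
--         s = j
--     res = word[s:]
--     return None if 2 * len(res) < n else res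
-- ===== Notes on version B (the rewrite author's own statement) =====
-- stated objective: faster
-- what changed: Replaces A's backward state machine, which rescans the whole preceding prefix for a vowel at every vowel it meets, by one precomputed vowel-flag list plus direct index scans that locate the starts of the last and second-last vowel groups.
import Mathlib
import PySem

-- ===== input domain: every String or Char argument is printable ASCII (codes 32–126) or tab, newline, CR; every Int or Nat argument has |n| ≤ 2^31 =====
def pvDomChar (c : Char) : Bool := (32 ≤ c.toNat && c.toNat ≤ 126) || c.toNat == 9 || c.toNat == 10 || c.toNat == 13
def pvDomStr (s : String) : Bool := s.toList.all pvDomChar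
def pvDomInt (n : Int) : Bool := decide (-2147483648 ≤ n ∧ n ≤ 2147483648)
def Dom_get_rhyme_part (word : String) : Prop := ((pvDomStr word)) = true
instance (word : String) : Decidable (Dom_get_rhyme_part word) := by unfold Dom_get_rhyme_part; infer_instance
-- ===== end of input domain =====

-- B replaces A's backward state machine (which rescans the whole prefix for a
-- vowel at every vowel it meets) by one precomputed vowel-flag list and direct
-- index scans for the starts of the last two vowel groups.

-- ===== PORT A =====
def pvVOWELS : List Char := ['a', 'e', 'i', 'o', 'u', 'ä', 'ö', 'ü']

-- single-character `v in word` is character membership — exact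
def is_vowel (char : Char) (word : String) : Bool :=
  if char == 'y' && !(pvVOWELS.any (fun v => word.toList.contains v)) then true
  else pvVOWELS.contains char

-- the `for idx, i in enumerate(reversed(word))` loop of A, with its three flags;
-- `break`/fall-through yields Option; the post-loop check is ported at the caller.
def pvLoopA (word : String) (idx : Nat) (chars : List Char) (aL bt aP : Bool) : Option String :=
  match chars with
  | [] => none
  | c :: rest =>
    if is_vowel c word then
      if !((PySem.List.slice word.toList none (some (-((idx : Int) + 1)))).any
            (fun j => is_vowel j word)) then
        some (String.ofList (PySem.List.slice word.toList (some (-((idx : Int) + 1))) none))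
      else
        pvLoopA word (idx + 1) rest true bt (aP || (aL && bt))
    else if aP then
      some (String.ofList (PySem.List.slice word.toList (some (-(idx : Int))) none))
    else
      pvLoopA word (idx + 1) rest aL (if aL && !bt then true else bt) aP

def get_rhyme_part (word : String) : Option String :=
  match pvLoopA word 0 word.toList.reverse false false false with
  | none => none
  | some r =>
    -- `not result or (len(word) / 2) > len(result)`: a string is falsy iff empty,
    -- and `n / 2 > L` over exact float halves is `n > 2 * L` — exact
    if r.toList.isEmpty || 2 * r.toList.length < word.toList.length then none else some r

-- ===== PORT B =====
-- `while i >= 0 and not flags[i]: i -= 1` (rightmost set flag at index ≤ i)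
def pvScanDown (g : List Bool) (i : Nat) : Option Nat :=
  if g.getD i false then some i
  else match i with
    | 0 => none
    | i' + 1 => pvScanDown g i'

-- `while i > 0 and flags[i - 1]: i -= 1` (start of the flag run ending at i)
def pvGroupStart (g : List Bool) (p : Nat) : Nat :=
  match p with
  | 0 => 0
  | p' + 1 => if g.getD p' false then pvGroupStart g p' else p' + 1

def get_rhyme_part_alt (word : String) : Option String :=
  let l := word.toList
  let yok := !(pvVOWELS.any (fun v => l.contains v))
  let g := l.map (fun c => pvVOWELS.contains c || (c == 'y' && yok))
  let n := l.length
  match pvScanDown g (n - 1) with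
  | none => none
  | some p =>
    let s := pvGroupStart g p
    let s2 :=
      match (match s with | 0 => none | s' + 1 => pvScanDown g s') with
      | none => s
      | some q => pvGroupStart g q
    let res := l.drop s2
    if 2 * res.length < n then none else some (String.ofList res)

-- ===== PRECONDITION & SPEC =====
def Spec_get_rhyme_part (word : String) (out : Option String) : Prop := out = get_rhyme_part_alt word
instance (word : String) (out : Option String) : Decidable (Spec_get_rhyme_part word out) := by unfold Spec_get_rhyme_part; infer_instance

-- ===== CLAIM (what is proved, stated in full; the proofs are below) =====
def Claim_equal_get_rhyme_part : Prop := ∀ (word : String), Dom_get_rhyme_part word → Spec_get_rhyme_part word (get_rhyme_part word)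


-- ===== LEMMAS AND PROOFS =====

-- vowel flag of position i (out of range: blank, never a vowel)
def pvV (word : String) (i : Nat) : Bool := is_vowel (word.toList.getD i ' ') word
-- whether some vowel occurs strictly before position m (exactly A inner any-scan)
def pvAnyV (word : String) (m : Nat) : Bool :=
  (word.toList.take m).any (fun j => is_vowel j word)

theorem pv_toList_ofList (l : List Char) : (String.ofList l).toList = l := by simp

theorem pvFinal (word : String) (X : Nat) (hX : X < word.toList.length) :
    (if ((String.ofList (List.drop X word.toList)).toList.isEmpty ||
          decide (2 * (String.ofList (List.drop X word.toList)).toList.length < word.toList.length)) = true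
      then (none : Option String) else some (String.ofList (List.drop X word.toList))) =
    (if 2 * (List.drop X word.toList).length < word.toList.length then (none : Option String)
      else some (String.ofList (List.drop X word.toList))) := by
  rw [pv_toList_ofList]
  have hlen0 : (List.drop X word.toList).length ≠ 0 := by
    rw [List.length_drop]; omega
  have hne : (List.drop X word.toList).isEmpty = false := by
    cases he : (List.drop X word.toList).isEmpty
    · rfl
    · exact absurd (congrArg List.length (List.isEmpty_iff.mp he)) (by simpa using hlen0)
  rw [hne, Bool.false_or]
  by_cases hlen : 2 * (List.drop X word.toList).length < word.toList.length
  · rw [if_pos (by simpa using hlen), if_pos hlen]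
  · rw [if_neg (by simpa using hlen), if_neg hlen]

theorem pv_take_rev_cons (l : List Char) (m : Nat) (h : m < l.length) :
    (l.take (m + 1)).reverse = l.getD m ' ' :: (l.take m).reverse := by
  rw [List.take_add_one, List.getElem?_eq_getElem h, List.getD_eq_getElem l ' ' h]
  simp

theorem pvV_ge (word : String) {i : Nat} (h : word.toList.length ≤ i) :
    pvV word i = false := by
  unfold pvV
  rw [List.getD_eq_default _ _ h]
  simp [is_vowel, pvVOWELS]

theorem pvAnyV_iff (word : String) (m : Nat) :
    pvAnyV word m = true ↔ ∃ j, j < m ∧ j < word.toList.length ∧ pvV word j = true := by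
  unfold pvAnyV
  rw [List.any_eq_true]
  constructor
  · rintro ⟨x, hx, hvx⟩
    obtain ⟨j, hj, rfl⟩ := List.mem_iff_getElem.1 hx
    have hjt : j < (word.toList.take m).length := hj
    rw [List.length_take] at hjt
    have hj2 : j < word.toList.length := by omega
    refine ⟨j, by omega, hj2, ?_⟩
    unfold pvV
    rw [List.getD_eq_getElem _ ' ' hj2]
    simpa [List.getElem_take] using hvx
  · rintro ⟨j, hjm, hjl, hv⟩
    refine ⟨word.toList[j], ?_, ?_⟩
    · have hjt : j < (word.toList.take m).length := by rw [List.length_take]; omega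
      have hmem := List.getElem_mem hjt
      simpa [List.getElem_take] using hmem
    · unfold pvV at hv
      rwa [List.getD_eq_getElem _ ' ' hjl] at hv

theorem pvAnyV_mono (word : String) {a m : Nat} (h : pvAnyV word a = true) (ham : a ≤ m) :
    pvAnyV word m = true := by
  rw [pvAnyV_iff] at h ⊢
  obtain ⟨j, h1, h2, h3⟩ := h
  exact ⟨j, by omega, h2, h3⟩

theorem pvAnyV_of_V (word : String) {i m : Nat} (hi : i < m) (hin : i < word.toList.length)
    (hv : pvV word i = true) : pvAnyV word m = true := by
  rw [pvAnyV_iff]; exact ⟨i, hi, hin, hv⟩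

theorem pvAnyV_false (word : String) {m : Nat} (h : ∀ j, j < m → pvV word j = false) :
    pvAnyV word m = false := by
  cases hx : pvAnyV word m with
  | false => rfl
  | true =>
    rw [pvAnyV_iff] at hx
    obtain ⟨j, h1, _, h3⟩ := hx
    rw [h j h1] at h3
    exact absurd h3 (by simp)

-- one unfolding of A's loop at a vowel position m (slices normalised)
theorem pvLoopA_step_vowel (word : String) {m : Nat} (hm : m < word.toList.length)
    (hv : pvV word m = true) (aL bt aP : Bool) :
    pvLoopA word (word.toList.length - (m + 1)) ((word.toList.take (m + 1)).reverse) aL bt aP =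
      if pvAnyV word m = false then some (String.ofList (word.toList.drop m))
      else pvLoopA word (word.toList.length - m) ((word.toList.take m).reverse) true bt (aP || (aL && bt)) := by
  have h1 : word.toList.length - (m + 1) + 1 = word.toList.length - m := by omega
  have h2 : ((word.toList.length - (m + 1) : Nat) : Int) + 1 = ((word.toList.length - m : Nat) : Int) := by omega
  have h3 : 0 < word.toList.length - m := by omega
  have h4 : word.toList.length - (word.toList.length - m) = m := by omega
  rw [pv_take_rev_cons _ _ hm]
  unfold pvV at hv
  simp only [pvLoopA]
  rw [h2, PySem.List.slice_to_neg_natCast _ _ h3, PySem.List.slice_from_neg_natCast _ _ h3,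
    h4, h1, hv]
  unfold pvAnyV
  cases hA : ((word.toList.take m).any fun j => is_vowel j word) with
  | false => simp
  | true => simp

-- one unfolding at a consonant position, pen flag still off
theorem pvLoopA_step_cons (word : String) {m : Nat} (hm : m < word.toList.length)
    (hv : pvV word m = false) (aL bt : Bool) :
    pvLoopA word (word.toList.length - (m + 1)) ((word.toList.take (m + 1)).reverse) aL bt false =
      pvLoopA word (word.toList.length - m) ((word.toList.take m).reverse) aL (if aL && !bt then true else bt) false := by
  have h1 : word.toList.length - (m + 1) + 1 = word.toList.length - m := by omega
  rw [pv_take_rev_cons _ _ hm]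
  unfold pvV at hv
  simp only [pvLoopA, hv, Bool.false_eq_true, if_false, h1]

-- one unfolding at a consonant position with the pen flag on: break
theorem pvLoopA_step_break (word : String) {m : Nat} (hm : m + 1 < word.toList.length)
    (hv : pvV word m = false) (aL bt : Bool) :
    pvLoopA word (word.toList.length - (m + 1)) ((word.toList.take (m + 1)).reverse) aL bt true =
      some (String.ofList (word.toList.drop (m + 1))) := by
  have h3 : 0 < word.toList.length - (m + 1) := by omega
  have h4 : word.toList.length - (word.toList.length - (m + 1)) = m + 1 := by omega
  rw [pv_take_rev_cons _ _ (by omega)]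
  unfold pvV at hv
  simp only [pvLoopA, hv, Bool.false_eq_true, if_false, if_true,
    PySem.List.slice_from_neg_natCast _ _ h3, h4]

-- phase: a run of consonants with the pen flag off just sets `between`
theorem pvPhase_consAux (word : String) (d : Nat) :
    ∀ (a : Nat) (aL bt : Bool), a + d ≤ word.toList.length →
    (∀ i, a ≤ i → i < a + d → pvV word i = false) →
    pvLoopA word (word.toList.length - (a + d)) ((word.toList.take (a + d)).reverse) aL bt false =
      pvLoopA word (word.toList.length - a) ((word.toList.take a).reverse) aL (bt || (decide (0 < d) && aL)) false := by
  induction d with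
  | zero => intro a aL bt _ _; simp
  | succ d ih =>
    intro a aL bt hlen hyp
    rw [show a + (d + 1) = (a + d) + 1 from rfl,
      pvLoopA_step_cons word (by omega) (hyp (a + d) (by omega) (by omega)) aL bt,
      ih a aL (if aL && !bt then true else bt) (by omega) (fun i h1 h2 => hyp i h1 (by omega))]
    congr 1
    cases aL <;> cases bt <;> simp

theorem pvPhase_cons (word : String) (a b : Nat) (hab : a ≤ b) (hb : b ≤ word.toList.length)
    (hyp : ∀ i, a ≤ i → i < b → pvV word i = false) (aL bt : Bool) :
    pvLoopA word (word.toList.length - b) ((word.toList.take b).reverse) aL bt false =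
      pvLoopA word (word.toList.length - a) ((word.toList.take a).reverse) aL (bt || (decide (a < b) && aL)) false := by
  obtain ⟨d, rfl⟩ : ∃ d, b = a + d := ⟨b - a, by omega⟩
  rw [show decide (a < a + d) = decide (0 < d) by simp]
  exact pvPhase_consAux word d a aL bt hb hyp

-- phase: a run of vowels with earlier vowels present, between/pen off
theorem pvPhase_vowel1Aux (word : String) (d : Nat) :
    ∀ (a : Nat) (aL : Bool), a + d ≤ word.toList.length →
    (∀ i, a ≤ i → i < a + d → pvV word i = true) →
    pvAnyV word a = true →
    pvLoopA word (word.toList.length - (a + d)) ((word.toList.take (a + d)).reverse) aL false false =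
      pvLoopA word (word.toList.length - a) ((word.toList.take a).reverse) (aL || decide (0 < d)) false false := by
  induction d with
  | zero => intro a aL _ _ _; simp
  | succ d ih =>
    intro a aL hlen hyp hA
    have hAm : pvAnyV word (a + d) = true := pvAnyV_mono word hA (by omega)
    rw [show a + (d + 1) = (a + d) + 1 from rfl,
      pvLoopA_step_vowel word (by omega) (hyp (a + d) (by omega) (by omega)) aL false false,
      hAm, if_neg (by simp)]
    simp only [Bool.and_false, Bool.or_false]
    rw [ih a true (by omega) (fun i h1 h2 => hyp i h1 (by omega)) hA]
    have : (true || decide (0 < d)) = (aL || decide (0 < d + 1)) := by simp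
    rw [this]

theorem pvPhase_vowel1 (word : String) (a b : Nat) (hab : a ≤ b) (hb : b ≤ word.toList.length)
    (hyp : ∀ i, a ≤ i → i < b → pvV word i = true) (hA : pvAnyV word a = true) (aL : Bool) :
    pvLoopA word (word.toList.length - b) ((word.toList.take b).reverse) aL false false =
      pvLoopA word (word.toList.length - a) ((word.toList.take a).reverse) (aL || decide (a < b)) false false := by
  obtain ⟨d, rfl⟩ : ∃ d, b = a + d := ⟨b - a, by omega⟩
  rw [show decide (a < a + d) = decide (0 < d) by simp]
  exact pvPhase_vowel1Aux word d a aL hb hyp hA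

-- phase: a run of vowels with earlier vowels, last+between set: pen turns on
theorem pvPhase_vowel2Aux (word : String) (d : Nat) :
    ∀ (a : Nat) (aP : Bool), a + d ≤ word.toList.length →
    (∀ i, a ≤ i → i < a + d → pvV word i = true) →
    pvAnyV word a = true →
    pvLoopA word (word.toList.length - (a + d)) ((word.toList.take (a + d)).reverse) true true aP =
      pvLoopA word (word.toList.length - a) ((word.toList.take a).reverse) true true (aP || decide (0 < d)) := by
  induction d with
  | zero => intro a aP _ _ _; simp
  | succ d ih =>
    intro a aP hlen hyp hA
    have hAm : pvAnyV word (a + d) = true := pvAnyV_mono word hA (by omega)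
    rw [show a + (d + 1) = (a + d) + 1 from rfl,
      pvLoopA_step_vowel word (by omega) (hyp (a + d) (by omega) (by omega)) true true aP,
      hAm, if_neg (by simp)]
    simp only [Bool.and_self, Bool.or_true]
    rw [ih a true (by omega) (fun i h1 h2 => hyp i h1 (by omega)) hA]
    have : (true || decide (0 < d)) = (aP || decide (0 < d + 1)) := by simp
    rw [this]

theorem pvPhase_vowel2 (word : String) (a b : Nat) (hab : a ≤ b) (hb : b ≤ word.toList.length)
    (hyp : ∀ i, a ≤ i → i < b → pvV word i = true) (hA : pvAnyV word a = true) (aP : Bool) :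
    pvLoopA word (word.toList.length - b) ((word.toList.take b).reverse) true true aP =
      pvLoopA word (word.toList.length - a) ((word.toList.take a).reverse) true true (aP || decide (a < b)) := by
  obtain ⟨d, rfl⟩ : ∃ d, b = a + d := ⟨b - a, by omega⟩
  rw [show decide (a < a + d) = decide (0 < d) by simp]
  exact pvPhase_vowel2Aux word d a aP hb hyp hA

-- phase: a run of vowels reaching the word's first vowel: break with the suffix
theorem pvPhase_vowel_firstAux (word : String) (d : Nat) :
    ∀ (a : Nat) (aL bt aP : Bool), 0 < d → a + d ≤ word.toList.length →
    (∀ i, a ≤ i → i < a + d → pvV word i = true) →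
    pvAnyV word a = false →
    pvLoopA word (word.toList.length - (a + d)) ((word.toList.take (a + d)).reverse) aL bt aP =
      some (String.ofList (word.toList.drop a)) := by
  induction d with
  | zero => intro a aL bt aP h0 _ _ _; omega
  | succ d ih =>
    intro a aL bt aP _ hlen hyp hA
    rw [show a + (d + 1) = (a + d) + 1 from rfl,
      pvLoopA_step_vowel word (by omega) (hyp (a + d) (by omega) (by omega)) aL bt aP]
    by_cases hd : d = 0
    · subst hd
      simp only [Nat.add_zero] at *
      rw [hA]
      simp
    · have hAm : pvAnyV word (a + d) = true :=
        pvAnyV_of_V word (i := a) (by omega) (by omega) (hyp a (by omega) (by omega))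
      rw [hAm, if_neg (by simp)]
      exact ih a true bt (aP || (aL && bt)) (by omega) (by omega)
        (fun i h1 h2 => hyp i h1 (by omega)) hA

theorem pvPhase_vowel_first (word : String) (a b : Nat) (hab : a < b) (hb : b ≤ word.toList.length)
    (hyp : ∀ i, a ≤ i → i < b → pvV word i = true) (hA : pvAnyV word a = false) (aL bt aP : Bool) :
    pvLoopA word (word.toList.length - b) ((word.toList.take b).reverse) aL bt aP =
      some (String.ofList (word.toList.drop a)) := by
  obtain ⟨d, rfl⟩ : ∃ d, b = a + d := ⟨b - a, by omega⟩
  exact pvPhase_vowel_firstAux word d a aL bt aP (by omega) hb hyp hA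

theorem pvScanDown_none {g : List Bool} {i : Nat} (h : pvScanDown g i = none) :
    ∀ j, j ≤ i → g.getD j false = false := by
  induction i with
  | zero =>
    intro j hj
    have hj0 : j = 0 := by omega
    subst hj0
    unfold pvScanDown at h
    split at h
    · exact absurd h (by simp)
    · next hc => simpa using hc
  | succ i ih =>
    intro j hj
    unfold pvScanDown at h
    split at h
    · exact absurd h (by simp)
    · next hc =>
      rcases Nat.lt_or_ge j (i + 1) with hlt | hge
      · exact ih h j (by omega)
      · have hj1 : j = i + 1 := by omega
        subst hj1
        simpa using hc

theorem pvScanDown_some {g : List Bool} {i p : Nat} (h : pvScanDown g i = some p) :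
    p ≤ i ∧ g.getD p false = true ∧ ∀ j, p < j → j ≤ i → g.getD j false = false := by
  induction i with
  | zero =>
    unfold pvScanDown at h
    split at h
    · next hc =>
      injection h with h'
      subst h'
      exact ⟨Nat.le_refl 0, hc, fun j h1 h2 => by omega⟩
    · exact absurd h (by simp)
  | succ i ih =>
    unfold pvScanDown at h
    split at h
    · next hc =>
      injection h with h'
      subst h'
      exact ⟨Nat.le_refl _, hc, fun j h1 h2 => by omega⟩
    · next hc =>
      obtain ⟨h1, h2, h3⟩ := ih h
      refine ⟨by omega, h2, fun j hj1 hj2 => ?_⟩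
      rcases Nat.lt_or_ge j (i + 1) with hlt | hge
      · exact h3 j hj1 (by omega)
      · have hj1' : j = i + 1 := by omega
        subst hj1'
        simpa using hc

theorem pvGroupStart_le (g : List Bool) (p : Nat) : pvGroupStart g p ≤ p := by
  induction p with
  | zero => simp [pvGroupStart]
  | succ p ih =>
    unfold pvGroupStart
    split
    · exact Nat.le_trans ih (by omega)
    · exact Nat.le_refl _

theorem pvGroupStart_vowels (g : List Bool) (p : Nat) (hp : g.getD p false = true) :
    ∀ j, pvGroupStart g p ≤ j → j ≤ p → g.getD j false = true := by
  induction p with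
  | zero =>
    intro j h1 h2
    have hj0 : j = 0 := by omega
    subst hj0
    exact hp
  | succ p ih =>
    intro j h1 h2
    revert h1
    unfold pvGroupStart
    split
    · next hc =>
      intro h1
      rcases Nat.lt_or_ge j (p + 1) with hlt | hge
      · exact ih hc j h1 (by omega)
      · have hj1 : j = p + 1 := by omega
        subst hj1
        exact hp
    · next hc =>
      intro h1
      have hj1 : j = p + 1 := by omega
      subst hj1
      exact hp

theorem pvGroupStart_start (g : List Bool) (p : Nat) :
    pvGroupStart g p = 0 ∨ g.getD (pvGroupStart g p - 1) false = false := by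
  induction p with
  | zero => left; rfl
  | succ p ih =>
    unfold pvGroupStart
    split
    · exact ih
    · next hc =>
      right
      simp only [Nat.add_sub_cancel]
      simpa using hc

-- B's flag expression agrees with A's is_vowel on every character
theorem pvFlag_eq (word : String) (c : Char) :
    (pvVOWELS.contains c || (c == 'y' && !(pvVOWELS.any (fun v => word.toList.contains v)))) =
      is_vowel c word := by
  unfold is_vowel
  cases h : (c == 'y' && !(pvVOWELS.any (fun v => word.toList.contains v))) with
  | false => simp
  | true => simp

-- B's flag list agrees with A's vowel flag at every position
theorem pvFlags_getD (word : String) (i : Nat) :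
    ((word.toList.map (fun c => pvVOWELS.contains c ||
        (c == 'y' && !(pvVOWELS.any (fun v => word.toList.contains v))))).getD i false) =
      pvV word i := by
  rcases Nat.lt_or_ge i word.toList.length with hi | hi
  · rw [List.getD_eq_getElem _ false (by simpa using hi), List.getElem_map, pvFlag_eq]
    unfold pvV
    rw [List.getD_eq_getElem _ ' ' hi]
  · rw [List.getD_eq_default _ _ (by simpa using hi), pvV_ge word hi]

theorem pv_main (word : String) : get_rhyme_part word = get_rhyme_part_alt word := by
  have hg := pvFlags_getD word
  have hstart : pvLoopA word 0 word.toList.reverse false false false =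
      pvLoopA word (word.toList.length - word.toList.length)
        ((word.toList.take word.toList.length).reverse) false false false := by
    rw [Nat.sub_self, List.take_length]
  simp only [get_rhyme_part, get_rhyme_part_alt]
  generalize hgen : (word.toList.map fun c => pvVOWELS.contains c ||
    (c == 'y' && !(pvVOWELS.any fun v => word.toList.contains v))) = g
  rw [hgen] at hg
  rcases hscan : pvScanDown g (word.toList.length - 1) with _ | P
  · -- no vowel group at all: both return None
    have hall : ∀ i, (0:Nat) ≤ i → i < word.toList.length → pvV word i = false := by
      intro i _ hi
      rw [← hg i]
      exact pvScanDown_none hscan i (by omega)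
    rw [hstart, pvPhase_cons word 0 word.toList.length (by omega) (by omega) hall false false]
    simp [pvLoopA]
  · obtain ⟨hP1, hP2', hP3⟩ := pvScanDown_some hscan
    have hP2 : pvV word P = true := by rw [← hg P]; exact hP2'
    have hPn : P < word.toList.length := by
      by_contra hc
      rw [pvV_ge word (by omega)] at hP2
      exact absurd hP2 (by simp)
    rw [hstart, pvPhase_cons word (P + 1) word.toList.length (by omega) (by omega)
      (fun i h1 h2 => by rw [← hg i]; exact hP3 i (by omega) (by omega)) false false]
    have hbt0 : (false || (decide (P + 1 < word.toList.length) && false)) = false := by simp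
    rw [hbt0]
    have hSle := pvGroupStart_le g P
    have hSvow : ∀ j, pvGroupStart g P ≤ j → j ≤ P → pvV word j = true := fun j h1 h2 => by
      rw [← hg j]
      exact pvGroupStart_vowels g P (by rw [hg P]; exact hP2) j h1 h2
    have hSstart := pvGroupStart_start g P
    rcases hS0 : pvGroupStart g P with _ | s'
    · -- the last vowel group starts at position 0
      rw [hS0] at hSvow
      have hA0 : pvAnyV word 0 = false := pvAnyV_false word (fun j hj => absurd hj (Nat.not_lt_zero j))
      rw [pvPhase_vowel_first word 0 (P + 1) (by omega) (by omega)
        (fun i h1 h2 => hSvow i (by omega) (by omega)) hA0]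
      simp only [hS0]
      exact pvFinal word 0 (by omega)
    · rw [hS0] at hSle hSvow hSstart
      rcases hscan2 : pvScanDown g s' with _ | Q
      · -- no vowel before the last group
        have hAS : pvAnyV word (s' + 1) = false := pvAnyV_false word (fun j hj => by
          rw [← hg j]
          exact pvScanDown_none hscan2 j (by omega))
        rw [pvPhase_vowel_first word (s' + 1) (P + 1) (by omega) (by omega)
          (fun i h1 h2 => hSvow i (by omega) (by omega)) hAS]
        simp only [hS0, hscan2]
        exact pvFinal word (s' + 1) (by omega)
      · obtain ⟨hQ1, hQ2', hQ3⟩ := pvScanDown_some hscan2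
        have hQ2 : pvV word Q = true := by rw [← hg Q]; exact hQ2'
        have hQs' : Q < s' := by
          rcases Nat.lt_or_ge Q s' with h | h
          · exact h
          · exfalso
            have hQe : Q = s' := by omega
            rcases hSstart with h0 | hfalse
            · omega
            · rw [Nat.add_sub_cancel] at hfalse
              rw [hQe] at hQ2'
              rw [hQ2'] at hfalse
              exact absurd hfalse (by simp)
        have hTle := pvGroupStart_le g Q
        have hTvow : ∀ j, pvGroupStart g Q ≤ j → j ≤ Q → pvV word j = true := fun j h1 h2 => by
          rw [← hg j]
          exact pvGroupStart_vowels g Q (by rw [hg Q]; exact hQ2) j h1 h2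
        have hTstart := pvGroupStart_start g Q
        have hAS : pvAnyV word (s' + 1) = true :=
          pvAnyV_of_V word (i := Q) (by omega) (by omega) hQ2
        rw [pvPhase_vowel1 word (s' + 1) (P + 1) (by omega) (by omega)
          (fun i h1 h2 => hSvow i (by omega) (by omega)) hAS false]
        have e1 : (false || decide (s' + 1 < P + 1)) = true := by simp; omega
        rw [e1]
        rw [pvPhase_cons word (Q + 1) (s' + 1) (by omega) (by omega)
          (fun i h1 h2 => by rw [← hg i]; exact hQ3 i (by omega) (by omega)) true false]
        have e2 : (false || (decide (Q + 1 < s' + 1) && true)) = true := by simp; omega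
        rw [e2]
        by_cases hAT : pvAnyV word (pvGroupStart g Q) = true
        · rw [pvPhase_vowel2 word (pvGroupStart g Q) (Q + 1) (by omega) (by omega)
            (fun i h1 h2 => hTvow i h1 (by omega)) hAT false]
          have e3 : (false || decide (pvGroupStart g Q < Q + 1)) = true := by simp; omega
          rw [e3]
          have hT1 : 1 ≤ pvGroupStart g Q := by
            by_contra hc
            have h0 : pvGroupStart g Q = 0 := by omega
            rw [h0] at hAT
            rw [pvAnyV_false word (fun j hj => absurd hj (Nat.not_lt_zero j))] at hAT
            exact absurd hAT (by simp)
          have hTm1 : pvV word (pvGroupStart g Q - 1) = false := by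
            rcases hTstart with h0 | hfalse
            · omega
            · rw [← hg _]
              exact hfalse
          have hbrk := pvLoopA_step_break word (m := pvGroupStart g Q - 1) (by omega) hTm1 true true
          rw [show pvGroupStart g Q - 1 + 1 = pvGroupStart g Q by omega] at hbrk
          rw [hbrk]
          simp only [hS0, hscan2]
          exact pvFinal word (pvGroupStart g Q) (by omega)
        · have hAT' : pvAnyV word (pvGroupStart g Q) = false := by
            cases hx : pvAnyV word (pvGroupStart g Q)
            · rfl
            · exact absurd hx hAT
          rw [pvPhase_vowel_first word (pvGroupStart g Q) (Q + 1) (by omega) (by omega)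
            (fun i h1 h2 => hTvow i h1 (by omega)) hAT']
          simp only [hS0, hscan2]
          exact pvFinal word (pvGroupStart g Q) (by omega)

-- ===== VERDICT (by name: the statement is the Claim_ definition above) =====
theorem get_rhyme_part_spec : Claim_equal_get_rhyme_part := by
  intro word _
  unfold Spec_get_rhyme_part
  exact pv_main word
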